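-- pv_equiv track=rewrite | github.com/Mustapha-Elzehary/secuirty | sec.py | getGeneratedKeyVig
-- ===== SOURCE A (Python) =====
-- def getGeneratedKeyVig(word):
--     vigGlobalKey = "CRYKEYUNIQUE"
--     generatedKey, currIndex = "", 0
--     for i in range(len(word)):
--         if (currIndex >= len(vigGlobalKey)):
--             currIndex = 0
--         generatedKey += vigGlobalKey[currIndex]
--         currIndex += 1
--     return generatedKey
-- ===== SOURCE B (Python) =====
-- def getGeneratedKeyVig(word):
--     vigGlobalKey = "CRYKEYUNIQUE"
--     full = vigGlobalKey * (len(word) // len(vigGlobalKey) + 1)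
--     return full[:len(word)]
-- ===== Notes on version B (the rewrite author's own statement) =====
-- stated objective: idiomatic
-- what changed: Replaces the per-character loop with running index and reset branch by bulk construction: repeat the key enough times with string multiplication and slice to the word's length.
import Mathlib
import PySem

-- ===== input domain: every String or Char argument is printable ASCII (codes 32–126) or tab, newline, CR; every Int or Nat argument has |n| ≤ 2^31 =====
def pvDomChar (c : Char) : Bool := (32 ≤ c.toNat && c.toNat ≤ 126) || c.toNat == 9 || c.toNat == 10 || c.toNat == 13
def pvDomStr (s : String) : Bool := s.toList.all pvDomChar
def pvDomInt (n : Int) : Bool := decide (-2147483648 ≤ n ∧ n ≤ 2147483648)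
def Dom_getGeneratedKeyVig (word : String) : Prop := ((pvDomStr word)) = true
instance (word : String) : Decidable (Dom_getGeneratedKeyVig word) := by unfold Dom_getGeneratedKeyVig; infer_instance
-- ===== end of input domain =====

-- B replaces A's per-character loop (running index with a reset branch) by repeating
-- the key in bulk and slicing to the word's length; objective: idiomatic.

-- ===== PORT A =====
-- the index is always in range (0 ≤ currIndex < len(key)), so the getD default ' ' is never used
def getGeneratedKeyVig (word : String) : String :=
  let vigGlobalKey := "CRYKEYUNIQUE"
  let res := (PySem.List.pyRange 0 (PySem.Str.len word) 1).foldl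
    (fun (st : List Char × Int) _i =>
      let currIndex := if st.2 ≥ PySem.Str.len vigGlobalKey then (0 : Int) else st.2
      (st.1 ++ [(PySem.Str.pyGet? vigGlobalKey currIndex).getD ' '], currIndex + 1))
    ([], 0)
  String.mk res.1

-- ===== PORT B =====
-- key * k is List.replicate k … |>.flatten; full[:n] is take n
def getGeneratedKeyVig_alt (word : String) : String :=
  let vigGlobalKey := "CRYKEYUNIQUE"
  let n := word.toList.length
  let full := (List.replicate (n / vigGlobalKey.toList.length + 1) vigGlobalKey.toList).flatten
  String.mk (full.take n)

-- ===== PRECONDITION & SPEC =====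
def Spec_getGeneratedKeyVig (word : String) (out : String) : Prop := out = getGeneratedKeyVig_alt word
instance (word : String) (out : String) : Decidable (Spec_getGeneratedKeyVig word out) := by unfold Spec_getGeneratedKeyVig; infer_instance

-- ===== CLAIM (what is proved, stated in full; the proofs are below) =====
def Claim_equal_getGeneratedKeyVig : Prop := ∀ (word : String), Dom_getGeneratedKeyVig word → Spec_getGeneratedKeyVig word (getGeneratedKeyVig word)

-- ===== LEMMAS AND PROOFS =====

def pvKey : List Char := "CRYKEYUNIQUE".toList

lemma pvKey_length : pvKey.length = 12 := by decide

-- the character A's loop appends at iteration k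
def pvG (k : Nat) : Char := (PySem.Str.pyGet? "CRYKEYUNIQUE" ((k % 12 : Nat) : Int)).getD ' '

lemma pvG_eq (k : Nat) : pvG k = pvKey[k % 12]'(by rw [pvKey_length]; omega) := by
  unfold pvG PySem.Str.pyGet? PySem.Chars.pyGet?
  rw [PySem.List.pyGet?_natCast, List.getElem?_eq_getElem
    (by rw [show ("CRYKEYUNIQUE".toList).length = 12 from rfl]; omega)]
  rfl

-- the value of currIndex after n iterations of A's loop
def pvIdx (n : Nat) : Int := if n = 0 then 0 else ((n - 1) % 12 : Nat) + 1

lemma loopA (n : Nat) :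
    (PySem.List.pyRange 0 (n : Int) 1).foldl
      (fun (st : List Char × Int) _i =>
        (st.1 ++ [(PySem.Str.pyGet? "CRYKEYUNIQUE"
            (if st.2 ≥ (("CRYKEYUNIQUE".toList.length : Nat) : Int) then (0 : Int) else st.2)).getD ' '],
         (if st.2 ≥ (("CRYKEYUNIQUE".toList.length : Nat) : Int) then (0 : Int) else st.2) + 1))
      ([], 0)
    = ((List.range n).map pvG, pvIdx n) := by
  induction n with
  | zero => simp [PySem.List.pyRange_one_eq_nil (by omega : (0:Int) ≤ 0), pvIdx]
  | succ n ih =>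
    have hc : ((n+1:Nat):Int) = (n:Int)+1 := by push_cast; ring
    rw [hc, PySem.List.pyRange_one_succ_right (by omega : (0:Int) ≤ (n:Int)), List.foldl_append, ih]
    simp only [List.foldl_cons, List.foldl_nil]
    have hlen : (("CRYKEYUNIQUE".toList.length : Nat) : Int) = 12 := by decide
    have hci : (if pvIdx n ≥ (12:Int) then (0:Int) else pvIdx n) = ((n % 12 : Nat) : Int) := by
      by_cases h0 : n = 0
      · subst h0; simp [pvIdx]
      · simp only [pvIdx, if_neg h0]; split_ifs with h <;> omega
    simp only [hlen, hci]
    rw [List.range_succ, List.map_append]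
    refine Prod.ext ?_ ?_
    · simp [pvG]
    · simp [pvIdx]

lemma flatten_replicate_length (m : Nat) :
    (List.flatten (List.replicate m pvKey)).length = m * 12 := by
  induction m with
  | zero => simp
  | succ m ih => simp [List.replicate_succ, ih, pvKey_length]; ring

lemma flatten_replicate_getElem (m i : Nat) (h : i < m * 12)
    (hl : i < (List.flatten (List.replicate m pvKey)).length) :
    (List.flatten (List.replicate m pvKey))[i] = pvKey[i % 12]'(by rw [pvKey_length]; omega) := by
  induction m generalizing i with
  | zero => omega
  | succ m ih =>
    simp only [List.replicate_succ, List.flatten_cons]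
    by_cases h12 : i < 12
    · rw [List.getElem_append_left (by rw [pvKey_length]; omega)]
      congr 1; omega
    · rw [List.getElem_append_right (by rw [pvKey_length]; omega)]
      simp only [pvKey_length]
      rw [ih (i - 12) (by omega) (by rw [flatten_replicate_length]; omega)]
      congr 1; omega

lemma listEq (n : Nat) :
    ((List.replicate (n / 12 + 1) pvKey).flatten).take n = (List.range n).map pvG := by
  apply List.ext_getElem
  · rw [List.length_take, flatten_replicate_length, List.length_map, List.length_range]; omega
  · intro i h1 h2
    have hi : i < n := by simpa using h2
    rw [List.getElem_take, flatten_replicate_getElem _ i (by omega)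
      (by rw [flatten_replicate_length]; omega), List.getElem_map, List.getElem_range,
      pvG_eq]

-- ===== VERDICT (by name: the statement is the Claim_ definition above) =====
theorem getGeneratedKeyVig_spec : Claim_equal_getGeneratedKeyVig := by
  intro word _
  unfold Spec_getGeneratedKeyVig
  simp only [getGeneratedKeyVig, getGeneratedKeyVig_alt]
  simp only [show PySem.Str.len "CRYKEYUNIQUE" = (("CRYKEYUNIQUE".toList.length : Nat) : Int) from rfl]
  rw [show PySem.Str.len word = ((word.toList.length : Nat) : Int) from rfl, loopA]
  rw [show "CRYKEYUNIQUE".toList.length = 12 from rfl,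
      show "CRYKEYUNIQUE".toList = pvKey from rfl, listEq]
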